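-- pv_equiv track=rewrite | github.com/waffle87/leetcode | count_nodes_highest_score.py | countHighestScoreNodes
-- ===== SOURCE A (Python) =====
-- from collections import defaultdict
--
-- def countHighestScoreNodes(parents):
--     """
--     :type parents: List[int]
--     :rtype: int
--     """
--     n = [[0] * 2 for _ in range(len(parents))]
--     d = defaultdict(list)
--
--     def dfs(root):
--         if not d[root]:
--             return 1
--         if len(d[root]) == 1:
--             n[root][0] = dfs(d[root][0])
--         elif len(d[root]) == 2:
--             n[root][0] = dfs(d[root][0])
--             n[root][1] = dfs(d[root][1])
--         return n[root][0] + n[root][1] + 1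
--
--     for i in range(1, len(parents)):
--         d[parents[i]].append(i)
--     total, ans = dfs(0), []
--     for i, j in n:
--         ans.append(max(i, 1) * max(j, 1) * max(total - i - j - 1, 1))
--     return ans.count(max(ans))
-- ===== SOURCE B (Python) =====
-- from collections import defaultdict
--
-- def countHighestScoreNodes(parents):
--     n = len(parents)
--     children = defaultdict(list)
--     for i in range(1, n):
--         children[parents[i]].append(i)
--
--     # iterative post-order from the root: size[v] = nodes in v's subtree
--     size = [1] * n
--     stack = [(0, False)]
--     while stack:
--         v, done = stack.pop()
--         if done:
--             for c in children[v]: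
--                 size[v] += size[c]
--         else:
--             stack.append((v, True))
--             for c in children[v]:
--                 stack.append((c, False))
--
--     total = size[0]
--     best = count = 0
--     for v in range(n):
--         score = max(total - size[v], 1)
--         for c in children[v]:
--             score *= size[c]
--         if score > best:
--             best, count = score, 1
--         elif score == best:
--             count += 1
--     return count
-- ===== Notes on version B (the rewrite author's own statement) =====
-- stated objective: alternative
-- what changed: A's recursive dfs with a per-node [left,right] two-slot table and a build-list/max/count finish is replaced by an explicit-stack iterative post-order pass filling one subtree-size array plus a single running max/count pass over the scores; Pre_ excludes the empty list (both programs raise there) and inputs where some parent value has more than two children, which do not describe a binary tree (the function's stated input type).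
-- outside the precondition, e.g. on countHighestScoreNodes([-1, 0, 0, 0]): A returns 4, B returns 3; on countHighestScoreNodes([]): A raises ValueError, B raises IndexError
import Mathlib
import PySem

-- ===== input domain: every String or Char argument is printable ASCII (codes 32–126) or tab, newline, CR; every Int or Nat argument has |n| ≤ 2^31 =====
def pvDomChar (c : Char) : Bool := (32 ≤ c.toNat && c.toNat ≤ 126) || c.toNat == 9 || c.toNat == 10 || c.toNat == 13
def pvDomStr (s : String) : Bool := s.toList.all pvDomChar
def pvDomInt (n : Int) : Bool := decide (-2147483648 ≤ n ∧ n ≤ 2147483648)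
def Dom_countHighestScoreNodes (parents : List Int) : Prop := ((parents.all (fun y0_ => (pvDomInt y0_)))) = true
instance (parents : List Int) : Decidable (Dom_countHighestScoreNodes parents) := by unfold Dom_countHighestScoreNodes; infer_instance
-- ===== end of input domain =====

-- B replaces A's recursive dfs (with its per-node [left,right] two-slot storage) by an
-- explicit-stack post-order pass filling one subtree-size array, then a single running
-- max/count pass over the per-node scores (objective: alternative decomposition).

-- ===== PORT A =====
-- the defaultdict build loop: d[parents[i]].append(i)
def pvBuildD (parents : List Int) : PySem.Dict Int (List Int) :=
  (PySem.List.pyRange 1 parents.length 1).foldl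
    (fun d i => d.modify (PySem.List.pyGetD parents i 0) [] (fun l => l ++ [i]))
    PySem.Dict.empty

-- dfs with the n-array threaded through; the fuel argument is a totality guard only
-- (the recursion depth is at most parents.length on every run Python completes)
def pvDfsA (d : PySem.Dict Int (List Int)) : Nat → Int → List (Int × Int) → Int × List (Int × Int)
  | 0, _, arr => (1, arr)
  | f + 1, root, arr =>
    let ch := d.getD root []
    if ch = [] then (1, arr)
    else if ch.length = 1 then
      let r0 := pvDfsA d f (PySem.List.pyGetD ch 0 0) arr
      let arr1 := PySem.List.pySetD r0.2 root (r0.1, (PySem.List.pyGetD r0.2 root (0, 0)).2)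
      let e := PySem.List.pyGetD arr1 root (0, 0)
      (e.1 + e.2 + 1, arr1)
    else if ch.length = 2 then
      let r0 := pvDfsA d f (PySem.List.pyGetD ch 0 0) arr
      let arr1 := PySem.List.pySetD r0.2 root (r0.1, (PySem.List.pyGetD r0.2 root (0, 0)).2)
      let r1 := pvDfsA d f (PySem.List.pyGetD ch 1 0) arr1
      let arr2 := PySem.List.pySetD r1.2 root ((PySem.List.pyGetD r1.2 root (0, 0)).1, r1.1)
      let e := PySem.List.pyGetD arr2 root (0, 0)
      (e.1 + e.2 + 1, arr2)
    else
      let e := PySem.List.pyGetD arr root (0, 0)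
      (e.1 + e.2 + 1, arr)

def countHighestScoreNodes (parents : List Int) : Int :=
  let narr0 : List (Int × Int) := List.replicate parents.length (0, 0)
  let d := pvBuildD parents
  let r := pvDfsA d (parents.length + 1) 0 narr0
  let total := r.1
  let ans := r.2.foldl
    (fun acc ij => acc ++ [max ij.1 1 * max ij.2 1 * max (total - ij.1 - ij.2 - 1) 1]) []
  match PySem.List.max? ans (fun y => y) with
  | some m => (PySem.List.count ans m : Int)
  | none => 0   -- Python raises ValueError here: the empty list is excluded by Pre_

-- ===== PORT B =====
-- B's build loop: children[parents[i]].append(i)  (a defaultdict, like A's)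
def pvChildrenB (parents : List Int) : PySem.Dict Int (List Int) :=
  (PySem.List.pyRange 1 parents.length 1).foldl
    (fun d i => d.modify (PySem.List.pyGetD parents i 0) [] (fun l => l ++ [i]))
    PySem.Dict.empty

-- the stack loop; fuel 2*n+1 is a totality guard (each node enters the stack at most twice)
def pvRunB (children : PySem.Dict Int (List Int)) : Nat → List (Int × Bool) → List Int → List Int
  | _, [], size => size
  | 0, _, size => size
  | f + 1, (v, done) :: rest, size =>
    let ks := children.getD v []
    if done then
      pvRunB children f rest
        (ks.foldl (fun sz c =>
          PySem.List.pySetD sz v (PySem.List.pyGetD sz v 0 + PySem.List.pyGetD sz c 0)) size)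
    else
      pvRunB children f (ks.reverse.map (fun c => (c, false)) ++ (v, true) :: rest) size

def countHighestScoreNodes_alt (parents : List Int) : Int :=
  let n := parents.length
  let children := pvChildrenB parents
  let size := pvRunB children (2 * n + 1) [(0, false)] (List.replicate n 1)
  let total := PySem.List.pyGetD size 0 0
  let r := (PySem.List.pyRange 0 (n : Int) 1).foldl
    (fun bc v =>
      let s := (children.getD v []).foldl
        (fun s c => s * PySem.List.pyGetD size c 0)
        (max (total - PySem.List.pyGetD size v 0) 1)
      if s > bc.1 then (s, 1) else if s = bc.1 then (bc.1, bc.2 + 1) else bc)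
    ((0 : Int), (0 : Int))
  r.2

-- ===== PRECONDITION & SPEC =====
-- Pre_ excludes the empty list, on which A raises ValueError and B raises IndexError, and
-- inputs where some parent value has more than two children: those do not describe a
-- binary tree, the function's stated input type ('parents' of a binary tree).
def Pre_countHighestScoreNodes (parents : List Int) : Prop :=
  parents ≠ [] ∧ ∀ p ∈ parents.drop 1, (parents.drop 1).count p ≤ 2
instance (parents : List Int) : Decidable (Pre_countHighestScoreNodes parents) := by
  unfold Pre_countHighestScoreNodes; infer_instance

def pvWitness_countHighestScoreNodes : List Int := ([-1, 0, 0, 1, 1] : List Int)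

def Spec_countHighestScoreNodes (parents : List Int) (out : Int) : Prop :=
  out = countHighestScoreNodes_alt parents
instance (parents : List Int) (out : Int) : Decidable (Spec_countHighestScoreNodes parents out) := by
  unfold Spec_countHighestScoreNodes; infer_instance

-- ===== CLAIM (what is proved, stated in full; the proofs are below) =====
def Claim_equal_countHighestScoreNodes : Prop :=
  ∀ (parents : List Int), Dom_countHighestScoreNodes parents →
    Pre_countHighestScoreNodes parents →
    Spec_countHighestScoreNodes parents (countHighestScoreNodes parents)

-- ===== LEMMAS AND PROOFS =====

-- children of r in index order (exactly what A's defaultdict and B's defaultdict hold at r)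
def pvCH (parents : List Int) (r : Int) : List Int :=
  (PySem.List.pyRange 1 parents.length 1).filter (fun i => PySem.List.pyGetD parents i 0 == r)

-- the children A's dfs actually follows: a node with more than two children is a leaf to A
def pvK (parents : List Int) (r : Int) : List Int :=
  if (pvCH parents r).length ≤ 2 then pvCH parents r else []

-- the (unique) descent path 0 → … → x; l lists the proper ancestors of x in order
inductive PvChain (parents : List Int) : List Int → Int → Prop
  | base : PvChain parents [] 0
  | step {l r c} : PvChain parents l r → c ∈ pvK parents r → PvChain parents (l ++ [r]) c

-- fueled preorder listing of the descent subtree of x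
def pvPL (parents : List Int) : Nat → Int → List Int
  | 0, x => [x]
  | f + 1, x =>
    x :: (match pvCH parents x with
          | [] => []
          | [c] => pvPL parents f c
          | [c0, c1] => pvPL parents f c0 ++ pvPL parents f c1
          | _ => [])

def pvPLn (parents : List Int) (x : Int) : List Int := pvPL parents parents.length x

def pvSNi (parents : List Int) (x : Int) : Int := ((pvPLn parents x).length : Int)

-- the pair A's n-array holds at a visited node
def pvVal (parents : List Int) (j : Int) : Int × Int :=
  match pvCH parents j with
  | [] => (0, 0)
  | [c] => (pvSNi parents c, 0)
  | [c0, c1] => (pvSNi parents c0, pvSNi parents c1)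
  | _ => (0, 0)

-- ---- basic facts ----

lemma pv_mem_CH {parents : List Int} {c r : Int} :
    c ∈ pvCH parents r ↔ (1 ≤ c ∧ c < (parents.length : Int) ∧ PySem.List.pyGetD parents c 0 = r) := by
  simp [pvCH, List.mem_filter, PySem.List.mem_pyRange_one, and_assoc]

lemma pv_CH_nodup (parents : List Int) (r : Int) : (pvCH parents r).Nodup :=
  (PySem.List.nodup_pyRange_one 1 parents.length).filter _

lemma pv_K_sub {parents : List Int} {c r : Int} (h : c ∈ pvK parents r) : c ∈ pvCH parents r := by
  unfold pvK at h; split at h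
  · exact h
  · simp at h

lemma pv_K_nil {parents : List Int} {r : Int} (h : pvCH parents r = []) : pvK parents r = [] := by
  unfold pvK; rw [h]; simp

lemma pv_K_one {parents : List Int} {r c : Int} (h : pvCH parents r = [c]) :
    pvK parents r = [c] := by
  unfold pvK; rw [h]; simp

lemma pv_K_two {parents : List Int} {r c0 c1 : Int} (h : pvCH parents r = [c0, c1]) :
    pvK parents r = [c0, c1] := by
  unfold pvK; rw [h]; simp

lemma pv_K_big {parents : List Int} {r a b c2 : Int} {t : List Int}
    (h : pvCH parents r = a :: b :: c2 :: t) : pvK parents r = [] := by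
  unfold pvK; rw [h]
  apply if_neg
  intro hle
  simp only [List.length_cons] at hle
  omega

lemma pv_mem_K {parents : List Int} {c r : Int} (h : c ∈ pvK parents r) :
    1 ≤ c ∧ c < (parents.length : Int) ∧ PySem.List.pyGetD parents c 0 = r :=
  pv_mem_CH.mp (pv_K_sub h)

lemma pv_chain_not_base {parents : List Int} {r c : Int} (h : c ∈ pvK parents r) : c ≠ 0 := by
  have := pv_mem_K h; omega

-- ---- Pre_ makes A's clamp invisible: every value has at most two children ----

lemma pv_map_range_drop (parents : List Int) :
    (PySem.List.pyRange 1 parents.length 1).map (fun i => PySem.List.pyGetD parents i 0) =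
      parents.drop 1 := by
  apply List.ext_getElem
  · simp [PySem.List.length_pyRange_one]
  · intro k hk1 hk2
    simp only [List.getElem_map]
    rw [PySem.List.getElem_pyRange_one]
    have hkn : k + 1 < parents.length := by
      simp only [List.length_map, PySem.List.length_pyRange_one] at hk1
      omega
    rw [show ((1 : Int) + (k : Int)) = (((k + 1 : Nat)) : Int) from by push_cast; ring,
      PySem.List.pyGetD_natCast, List.getD_eq_getElem parents 0 hkn, List.getElem_drop]
    congr 1
    omega

lemma pv_CH_length_eq_count (parents : List Int) (v : Int) :
    (pvCH parents v).length = (parents.drop 1).count v := by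
  unfold pvCH
  rw [← pv_map_range_drop parents, List.count_eq_countP, List.countP_map,
    ← List.countP_eq_length_filter]
  rfl

lemma pv_pre_K {parents : List Int}
    (h : ∀ p ∈ parents.drop 1, (parents.drop 1).count p ≤ 2) (v : Int) :
    pvK parents v = pvCH parents v := by
  unfold pvK
  rw [if_pos]
  rw [pv_CH_length_eq_count]
  by_cases hv : v ∈ parents.drop 1
  · exact h v hv
  · rw [List.count_eq_zero.mpr hv]; omega

-- ---- chain machinery ----

lemma pv_chain_inv {parents : List Int} {l' : List Int} {r c : Int}
    (h : PvChain parents l' c) (hc : c ∈ pvK parents r) :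
    ∃ l2, l' = l2 ++ [r] ∧ PvChain parents l2 r := by
  cases h with
  | base => exact absurd rfl (pv_chain_not_base hc)
  | step h' hm =>
    have e1 := (pv_mem_K hm).2.2
    have e2 := (pv_mem_K hc).2.2
    have : _ = r := e1.symm.trans e2
    subst this
    exact ⟨_, rfl, h'⟩

lemma pv_chain_unique {parents : List Int} {l l' : List Int} {x : Int}
    (h1 : PvChain parents l x) (h2 : PvChain parents l' x) : l = l' := by
  induction h1 generalizing l' with
  | base =>
    cases h2 with
    | base => rfl
    | step h' hm => exact absurd rfl (pv_chain_not_base hm)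
  | step h' hm ih =>
    obtain ⟨l2, rfl, h2'⟩ := pv_chain_inv h2 hm
    rw [ih h2']

lemma pv_chain_mem_split {parents : List Int} {l : List Int} {x : Int}
    (h : PvChain parents l x) : ∀ y ∈ l, ∃ l1, PvChain parents l1 y ∧ l1.length < l.length := by
  induction h with
  | base => intro y hy; simp at hy
  | step h' hm ih =>
    intro y hy
    rcases List.mem_append.mp hy with hy | hy
    · obtain ⟨l1, hc, hl⟩ := ih y hy
      exact ⟨l1, hc, by simp; omega⟩
    · simp at hy; subst hy
      exact ⟨_, h', by simp⟩

lemma pv_chain_nodup {parents : List Int} {l : List Int} {x : Int}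
    (h : PvChain parents l x) : (l ++ [x]).Nodup := by
  induction h with
  | base => simp
  | step h' hm ih =>
    rename_i l r c
    have hch : PvChain parents (l ++ [r]) c := PvChain.step h' hm
    have hnotmem : c ∉ l ++ [r] := by
      intro hmem
      obtain ⟨l1, hc1, hl1⟩ := pv_chain_mem_split hch c hmem
      have := pv_chain_unique hc1 hch
      subst this; omega
    exact List.Nodup.append ih (List.nodup_singleton c)
      (by simpa [List.disjoint_singleton] using hnotmem)

lemma pv_chain_range {parents : List Int} (hn : 0 < parents.length) {l : List Int} {x : Int}
    (h : PvChain parents l x) : 0 ≤ x ∧ x < (parents.length : Int) := by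
  cases h with
  | base => constructor <;> omega
  | step h' hm => have := pv_mem_K hm; omega

lemma pv_nodup_int_range_length {L : List Int} {n : Nat} (hnd : L.Nodup)
    (hr : ∀ j ∈ L, 0 ≤ j ∧ j < (n : Int)) : L.length ≤ n := by
  have h1 : (L.map Int.toNat).Nodup := by
    refine List.Nodup.map_on ?_ hnd
    intro x hx y hy hxy
    have := hr x hx; have := hr y hy; omega
  have h2 : (L.map Int.toNat).toFinset ⊆ Finset.range n := by
    intro a ha
    simp only [List.mem_toFinset, List.mem_map] at ha
    obtain ⟨x, hx, rfl⟩ := ha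
    have := hr x hx
    simp only [Finset.mem_range]; omega
  have h3 := Finset.card_le_card h2
  rw [Finset.card_range] at h3
  rwa [List.toFinset_card_of_nodup h1, List.length_map] at h3

lemma pv_chain_length_le {parents : List Int} (hn : 0 < parents.length) {l : List Int} {x : Int}
    (h : PvChain parents l x) : l.length + 1 ≤ parents.length := by
  have hnd := pv_chain_nodup h
  have hr : ∀ y ∈ l ++ [x], 0 ≤ y ∧ y < (parents.length : Int) := by
    intro y hy
    rcases List.mem_append.mp hy with hy | hy
    · obtain ⟨l1, hc, _⟩ := pv_chain_mem_split h y hy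
      exact pv_chain_range hn hc
    · simp at hy; subst hy
      exact pv_chain_range hn h
  have := pv_nodup_int_range_length hnd hr
  simpa using this

lemma pv_chain_kids_length {parents : List Int} (hn : 0 < parents.length) {l : List Int} {x : Int}
    (h : PvChain parents l x) (hne : pvK parents x ≠ []) : l.length + 2 ≤ parents.length := by
  obtain ⟨c, hc⟩ := List.exists_mem_of_ne_nil _ hne
  have := pv_chain_length_le hn (h.step hc)
  simp at this; omega

-- ---- preorder-list machinery ----

lemma pv_self_mem_pvPL (parents : List Int) (f : Nat) (x : Int) : x ∈ pvPL parents f x := by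
  cases f <;> simp [pvPL]

lemma pv_PL_length_pos (parents : List Int) (f : Nat) (x : Int) : 0 < (pvPL parents f x).length := by
  cases f <;> simp [pvPL]

lemma pv_pvPL_leaf {parents : List Int} {x : Int} (h : pvK parents x = []) (f : Nat) :
    pvPL parents f x = [x] := by
  cases f with
  | zero => rfl
  | succ f =>
    rcases hCH : pvCH parents x with _ | ⟨c, _ | ⟨c1, _ | ⟨c2, t⟩⟩⟩
    · simp [pvPL, hCH]
    · rw [pv_K_one hCH] at h; simp at h
    · rw [pv_K_two hCH] at h; simp at h
    · simp [pvPL, hCH]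

lemma pv_pvPL_stable {parents : List Int} (hn : 0 < parents.length) :
    ∀ (f g : Nat) (l : List Int) (x : Int), PvChain parents l x →
      parents.length - 1 - l.length ≤ f → parents.length - 1 - l.length ≤ g →
      pvPL parents f x = pvPL parents g x := by
  intro f
  induction f with
  | zero =>
    intro g l x hch hf hg
    by_cases hk : pvK parents x = []
    · rw [pv_pvPL_leaf hk, pv_pvPL_leaf hk]
    · exfalso; have := pv_chain_kids_length hn hch hk; omega
  | succ f ih =>
    intro g l x hch hf hg
    by_cases hk : pvK parents x = []
    · rw [pv_pvPL_leaf hk, pv_pvPL_leaf hk]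
    · have hlen := pv_chain_kids_length hn hch hk
      obtain ⟨g', rfl⟩ : ∃ g', g = g' + 1 := ⟨g - 1, by omega⟩
      rcases hCH : pvCH parents x with _ | ⟨c, _ | ⟨c1, _ | ⟨c2, t⟩⟩⟩
      · exact absurd (pv_K_nil hCH) hk
      · have hkc : c ∈ pvK parents x := by rw [pv_K_one hCH]; simp
        simp only [pvPL, hCH]
        rw [ih g' (l ++ [x]) c (hch.step hkc)
          (by simp only [List.length_append, List.length_cons, List.length_nil]; omega)
          (by simp only [List.length_append, List.length_cons, List.length_nil]; omega)]
      · have hkc : c ∈ pvK parents x := by rw [pv_K_two hCH]; simp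
        have hkc1 : c1 ∈ pvK parents x := by rw [pv_K_two hCH]; simp
        simp only [pvPL, hCH]
        rw [ih g' (l ++ [x]) c (hch.step hkc)
          (by simp only [List.length_append, List.length_cons, List.length_nil]; omega)
          (by simp only [List.length_append, List.length_cons, List.length_nil]; omega)]
        rw [ih g' (l ++ [x]) c1 (hch.step hkc1)
          (by simp only [List.length_append, List.length_cons, List.length_nil]; omega)
          (by simp only [List.length_append, List.length_cons, List.length_nil]; omega)]
      · simp [pvPL, hCH]

lemma pv_pvPL_mem_chain {parents : List Int} {j : Int} :
    ∀ (f : Nat) (l : List Int) (x : Int), PvChain parents l x → j ∈ pvPL parents f x →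
      ∃ m, PvChain parents (l ++ m) j ∧ (m = [] → j = x) ∧ (∀ h, m.head? = some h → h = x) := by
  intro f
  induction f with
  | zero =>
    intro l x hch hj
    simp [pvPL] at hj; subst hj
    exact ⟨[], by simpa using hch, fun _ => rfl, by simp⟩
  | succ f ih =>
    intro l x hch hj
    rcases hCH : pvCH parents x with _ | ⟨c, _ | ⟨c1, _ | ⟨c2, t⟩⟩⟩ <;>
      simp only [pvPL, hCH, List.mem_cons, List.mem_append, List.not_mem_nil, or_false] at hj
    · subst hj; exact ⟨[], by simpa using hch, fun _ => rfl, by simp⟩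
    · rcases hj with rfl | hj
      · exact ⟨[], by simpa using hch, fun _ => rfl, by simp⟩
      · have hkc : c ∈ pvK parents x := by rw [pv_K_one hCH]; simp
        obtain ⟨m', hc', _, _⟩ := ih (l ++ [x]) c (hch.step hkc) hj
        refine ⟨x :: m', ?_, by simp, ?_⟩
        · rw [show l ++ (x :: m') = (l ++ [x]) ++ m' by simp]; exact hc'
        · intro h hh; simp at hh; omega
    · rcases hj with rfl | hj | hj
      · exact ⟨[], by simpa using hch, fun _ => rfl, by simp⟩
      · have hkc : c ∈ pvK parents x := by rw [pv_K_two hCH]; simp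
        obtain ⟨m', hc', _, _⟩ := ih (l ++ [x]) c (hch.step hkc) hj
        refine ⟨x :: m', ?_, by simp, ?_⟩
        · rw [show l ++ (x :: m') = (l ++ [x]) ++ m' by simp]; exact hc'
        · intro h hh; simp at hh; omega
      · have hkc : c1 ∈ pvK parents x := by rw [pv_K_two hCH]; simp
        obtain ⟨m', hc', _, _⟩ := ih (l ++ [x]) c1 (hch.step hkc) hj
        refine ⟨x :: m', ?_, by simp, ?_⟩
        · rw [show l ++ (x :: m') = (l ++ [x]) ++ m' by simp]; exact hc'
        · intro h hh; simp at hh; omega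
    · subst hj; exact ⟨[], by simpa using hch, fun _ => rfl, by simp⟩

lemma pv_pvPL_not_self {parents : List Int} (hn : 0 < parents.length) {l : List Int} {x c : Int}
    (hch : PvChain parents l x) (hc : c ∈ pvK parents x) : x ∉ pvPLn parents c := by
  intro hmem
  obtain ⟨m, hm, _, _⟩ := pv_pvPL_mem_chain _ _ _ (hch.step hc) hmem
  have heq := pv_chain_unique hch hm
  have : l.length = ((l ++ [x]) ++ m).length := by rw [← heq]
  simp only [List.length_append, List.length_cons, List.length_nil] at this
  omega

lemma pv_pvPL_disjoint {parents : List Int} (hn : 0 < parents.length) {l : List Int} {x c0 c1 : Int}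
    (hch : PvChain parents l x) (hCH : pvCH parents x = [c0, c1]) :
    ∀ j, ¬ (j ∈ pvPLn parents c0 ∧ j ∈ pvPLn parents c1) := by
  have hc0 : c0 ∈ pvK parents x := by rw [pv_K_two hCH]; simp
  have hc1 : c1 ∈ pvK parents x := by rw [pv_K_two hCH]; simp
  have hne : c0 ≠ c1 := by
    have := pv_CH_nodup parents x
    rw [hCH] at this; simp at this; exact this
  rintro j ⟨hj0, hj1⟩
  obtain ⟨m0, hm0, h0e, h0h⟩ := pv_pvPL_mem_chain _ _ _ (hch.step hc0) hj0
  obtain ⟨m1, hm1, h1e, h1h⟩ := pv_pvPL_mem_chain _ _ _ (hch.step hc1) hj1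
  have heq : (l ++ [x]) ++ m0 = (l ++ [x]) ++ m1 := pv_chain_unique hm0 hm1
  have hm : m0 = m1 := by simpa using heq
  subst hm
  cases m0 with
  | nil => exact hne ((h0e rfl).symm.trans (h1e rfl))
  | cons a t => exact hne ((h0h a rfl).symm.trans (h1h a rfl))

lemma pv_pvPL_nodup {parents : List Int} (hn : 0 < parents.length) {l : List Int} {x : Int}
    (hch : PvChain parents l x) : (pvPLn parents x).Nodup := by
  suffices H : ∀ (f : Nat) (l : List Int) (x : Int), PvChain parents l x →
      parents.length - 1 - l.length ≤ f → (pvPL parents f x).Nodup by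
    exact H parents.length l x hch (by omega)
  intro f
  induction f with
  | zero => intro l x hch hf; simp [pvPL]
  | succ f ih =>
    intro l x hch hf
    by_cases hk : pvK parents x = []
    · rw [pv_pvPL_leaf hk]; simp
    · have hlen := pv_chain_kids_length hn hch hk
      have hτ : parents.length - 1 - (l ++ [x]).length ≤ f := by
        simp only [List.length_append, List.length_cons, List.length_nil]; omega
      have hτn : parents.length - 1 - (l ++ [x]).length ≤ parents.length := by omega
      rcases hCH : pvCH parents x with _ | ⟨c, _ | ⟨c1, _ | ⟨c2, t⟩⟩⟩
      · exact absurd (pv_K_nil hCH) hk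
      · have hkc : c ∈ pvK parents x := by rw [pv_K_one hCH]; simp
        have hst : pvPL parents f c = pvPLn parents c :=
          pv_pvPL_stable hn f parents.length (l ++ [x]) c (hch.step hkc) hτ hτn
        simp only [pvPL, hCH, List.nodup_cons]
        refine ⟨?_, ih (l ++ [x]) c (hch.step hkc) hτ⟩
        rw [hst]; exact pv_pvPL_not_self hn hch hkc
      · have hkc : c ∈ pvK parents x := by rw [pv_K_two hCH]; simp
        have hkc1 : c1 ∈ pvK parents x := by rw [pv_K_two hCH]; simp
        have hst : pvPL parents f c = pvPLn parents c :=
          pv_pvPL_stable hn f parents.length (l ++ [x]) c (hch.step hkc) hτ hτn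
        have hst1 : pvPL parents f c1 = pvPLn parents c1 :=
          pv_pvPL_stable hn f parents.length (l ++ [x]) c1 (hch.step hkc1) hτ hτn
        simp only [pvPL, hCH, List.nodup_cons, List.mem_append]
        refine ⟨?_, ?_⟩
        · rintro (hx | hx)
          · rw [hst] at hx; exact pv_pvPL_not_self hn hch hkc hx
          · rw [hst1] at hx; exact pv_pvPL_not_self hn hch hkc1 hx
        · refine List.Nodup.append (ih (l ++ [x]) c (hch.step hkc) hτ)
            (ih (l ++ [x]) c1 (hch.step hkc1) hτ) ?_
          intro a ha ha1
          rw [hst] at ha; rw [hst1] at ha1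
          exact pv_pvPL_disjoint hn hch hCH a ⟨ha, ha1⟩
      · simp [pvPL, hCH]

lemma pv_pvPL_range {parents : List Int} (hn : 0 < parents.length) {l : List Int} {x : Int}
    (hch : PvChain parents l x) : ∀ j ∈ pvPLn parents x, 0 ≤ j ∧ j < (parents.length : Int) := by
  intro j hj
  obtain ⟨m, hm, _, _⟩ := pv_pvPL_mem_chain _ _ _ hch hj
  exact pv_chain_range hn hm

lemma pv_SN_pos (parents : List Int) (x : Int) : 1 ≤ pvSNi parents x := by
  unfold pvSNi pvPLn
  have := pv_PL_length_pos parents parents.length x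
  omega

lemma pv_SN_le {parents : List Int} (hn : 0 < parents.length) {l : List Int} {x : Int}
    (hch : PvChain parents l x) : (pvPLn parents x).length ≤ parents.length :=
  pv_nodup_int_range_length (pv_pvPL_nodup hn hch) (pv_pvPL_range hn hch)

-- canonical unfoldings of pvPLn along a chain
lemma pv_pvPLn_leaf {parents : List Int} {x : Int} (hk : pvK parents x = []) :
    pvPLn parents x = [x] := pv_pvPL_leaf hk _

lemma pv_pvPLn_unfold_one {parents : List Int} (hn : 0 < parents.length) {l : List Int} {x c : Int}
    (hch : PvChain parents l x) (hCH : pvCH parents x = [c]) :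
    pvPLn parents x = x :: pvPLn parents c := by
  have hkc : c ∈ pvK parents x := by rw [pv_K_one hCH]; simp
  have hlen := pv_chain_kids_length hn hch (by rw [pv_K_one hCH]; simp)
  obtain ⟨m, hm⟩ : ∃ m, parents.length = m + 1 := ⟨parents.length - 1, by omega⟩
  have hτ : parents.length - 1 - (l ++ [x]).length ≤ m := by
    simp only [List.length_append, List.length_cons, List.length_nil]; omega
  calc pvPLn parents x = pvPL parents (m + 1) x := by rw [pvPLn, hm]
    _ = x :: pvPL parents m c := by simp only [pvPL, hCH]
    _ = x :: pvPLn parents c := by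
        rw [pv_pvPL_stable hn m parents.length (l ++ [x]) c (hch.step hkc) hτ (by omega)]
        rfl

lemma pv_pvPLn_unfold_two {parents : List Int} (hn : 0 < parents.length) {l : List Int}
    {x c0 c1 : Int} (hch : PvChain parents l x) (hCH : pvCH parents x = [c0, c1]) :
    pvPLn parents x = x :: (pvPLn parents c0 ++ pvPLn parents c1) := by
  have hkc : c0 ∈ pvK parents x := by rw [pv_K_two hCH]; simp
  have hkc1 : c1 ∈ pvK parents x := by rw [pv_K_two hCH]; simp
  have hlen := pv_chain_kids_length hn hch (by rw [pv_K_two hCH]; simp)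
  obtain ⟨m, hm⟩ : ∃ m, parents.length = m + 1 := ⟨parents.length - 1, by omega⟩
  have hτ : parents.length - 1 - (l ++ [x]).length ≤ m := by
    simp only [List.length_append, List.length_cons, List.length_nil]; omega
  calc pvPLn parents x = pvPL parents (m + 1) x := by rw [pvPLn, hm]
    _ = x :: (pvPL parents m c0 ++ pvPL parents m c1) := by simp only [pvPL, hCH]
    _ = x :: (pvPLn parents c0 ++ pvPLn parents c1) := by
        rw [pv_pvPL_stable hn m parents.length (l ++ [x]) c0 (hch.step hkc) hτ (by omega),
            pv_pvPL_stable hn m parents.length (l ++ [x]) c1 (hch.step hkc1) hτ (by omega)]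
        rfl

lemma pv_pvPL_kid_mem {parents : List Int} (hn : 0 < parents.length) {j c : Int}
    (hj : j ∈ pvPLn parents 0) (hc : c ∈ pvK parents j) : c ∈ pvPLn parents 0 := by
  suffices H : ∀ (f : Nat) (l : List Int) (x : Int), PvChain parents l x →
      parents.length - 1 - l.length ≤ f → j ∈ pvPL parents f x → c ∈ pvK parents j →
      c ∈ pvPL parents f x by
    exact H parents.length [] 0 PvChain.base (by simp) hj hc
  clear hj hc
  intro f
  induction f with
  | zero =>
    intro l x hch hf hj hc
    simp [pvPL] at hj
    have hkne : pvK parents x ≠ [] := by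
      intro h; rw [hj, h] at hc; simp at hc
    have := pv_chain_kids_length hn hch hkne; omega
  | succ f ih =>
    intro l x hch hf hj hc
    by_cases hk : pvK parents x = []
    · rw [pv_pvPL_leaf hk] at hj; simp at hj
      rw [hj, hk] at hc; simp at hc
    · have hlen := pv_chain_kids_length hn hch hk
      have hτ : parents.length - 1 - (l ++ [x]).length ≤ f := by
        simp only [List.length_append, List.length_cons, List.length_nil]; omega
      rcases hCH : pvCH parents x with _ | ⟨a, _ | ⟨a1, _ | ⟨a2, t⟩⟩⟩
      · exact absurd (pv_K_nil hCH) hk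
      · have hka : a ∈ pvK parents x := by rw [pv_K_one hCH]; simp
        simp only [pvPL, hCH, List.mem_cons] at hj ⊢
        rcases hj with hj | hj
        · rw [hj, pv_K_one hCH] at hc; simp at hc
          rw [hc]; exact Or.inr (pv_self_mem_pvPL parents f a)
        · exact Or.inr (ih (l ++ [x]) a (hch.step hka) hτ hj hc)
      · have hka : a ∈ pvK parents x := by rw [pv_K_two hCH]; simp
        have hka1 : a1 ∈ pvK parents x := by rw [pv_K_two hCH]; simp
        simp only [pvPL, hCH, List.mem_cons, List.mem_append] at hj ⊢
        rcases hj with hj | hj | hj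
        · rw [hj, pv_K_two hCH] at hc; simp at hc
          rcases hc with hc | hc
          · rw [hc]; exact Or.inr (Or.inl (pv_self_mem_pvPL parents f a))
          · rw [hc]; exact Or.inr (Or.inr (pv_self_mem_pvPL parents f a1))
        · exact Or.inr (Or.inl (ih (l ++ [x]) a (hch.step hka) hτ hj hc))
        · exact Or.inr (Or.inr (ih (l ++ [x]) a1 (hch.step hka1) hτ hj hc))
      · rw [pv_pvPL_leaf (pv_K_big hCH)] at hj; simp at hj
        rw [hj, pv_K_big hCH] at hc; simp at hc

lemma pv_chain_mem_root {parents : List Int} (hn : 0 < parents.length) {l : List Int} {x : Int}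
    (hch : PvChain parents l x) : x ∈ pvPLn parents 0 := by
  induction hch with
  | base => exact pv_self_mem_pvPL parents parents.length 0
  | step h' hm ih => exact pv_pvPL_kid_mem hn ih hm

lemma pv_reach_parent {parents : List Int} (hn : 0 < parents.length) {j c : Int}
    (hc : c ∈ pvK parents j) (hcr : c ∈ pvPLn parents 0) : j ∈ pvPLn parents 0 := by
  obtain ⟨m, hm, _, _⟩ := pv_pvPL_mem_chain _ _ _ PvChain.base hcr
  simp only [List.nil_append] at hm
  cases hm with
  | base => exact absurd rfl (pv_chain_not_base hc)
  | step h' hm' =>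
    have e1 := (pv_mem_K hm').2.2
    have e2 := (pv_mem_K hc).2.2
    have : _ = j := e1.symm.trans e2
    subst this
    exact pv_chain_mem_root hn h'

-- ---- glue for python indexing ----

lemma pv_pyGetD_replicate {α : Type} (n : Nat) (a d : α) (j : Int) (hj : 0 ≤ j) :
    PySem.List.pyGetD (List.replicate n a) j d = if j < (n : Int) then a else d := by
  lift j to Nat using hj with k
  rw [PySem.List.pyGetD_natCast]
  by_cases hk : k < n
  · rw [if_pos (by exact_mod_cast hk)]
    simp [List.getD, List.getElem?_replicate, hk]
  · rw [if_neg (by exact_mod_cast hk)]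
    simp [List.getD, List.getElem?_replicate, hk]

lemma pv_pyGetD_pySetD {α : Type} (xs : List α) (i j : Int) (v : α) (d : α)
    (hi : 0 ≤ i) (hilt : i < (xs.length : Int)) (hj : 0 ≤ j) :
    PySem.List.pyGetD (PySem.List.pySetD xs i v) j d = if j = i then v else PySem.List.pyGetD xs j d := by
  rw [PySem.List.pySetD_of_nonneg xs v hi]
  lift i to Nat using hi with m
  lift j to Nat using hj with k
  rw [PySem.List.pyGetD_natCast, PySem.List.pyGetD_natCast]
  have hm : m < xs.length := by exact_mod_cast hilt
  simp only [Int.toNat_natCast]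
  by_cases hk : k = m
  · subst hk
    rw [if_pos rfl]
    simp [List.getD, List.getElem?_set, hm]
  · rw [if_neg (by exact_mod_cast hk)]
    have hmk : m ≠ k := fun h => hk h.symm
    simp [List.getD, List.getElem?_set, hmk]

lemma pv_length_pySetD {α : Type} (xs : List α) (i : Int) (v : α) :
    (PySem.List.pySetD xs i v).length = xs.length := by
  simpa using PySem.List.length_pySetD xs i v

-- ---- the two builds produce pvCH ----

lemma pv_buildD_char (parents : List Int) (r : Int) :
    (pvBuildD parents).getD r [] = pvCH parents r := by
  unfold pvBuildD pvCH
  have hfm : ((PySem.List.pyRange 1 parents.length 1).map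
        (fun i => (PySem.List.pyGetD parents i 0, i))).foldl
      (fun d p => d.modify p.1 [] (fun l => l ++ [p.2])) PySem.Dict.empty =
      (PySem.List.pyRange 1 parents.length 1).foldl
        (fun d i => d.modify (PySem.List.pyGetD parents i 0) [] (fun l => l ++ [i]))
        PySem.Dict.empty := List.foldl_map
  rw [← hfm, PySem.Dict.getD_foldl_modify_append]
  simp [PySem.Dict.getD_empty, List.filter_map, List.map_map, Function.comp_def]

lemma pv_childrenB_char (parents : List Int) (r : Int) :
    (pvChildrenB parents).getD r [] = pvCH parents r := by
  unfold pvChildrenB pvCH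
  have hfm : ((PySem.List.pyRange 1 parents.length 1).map
        (fun i => (PySem.List.pyGetD parents i 0, i))).foldl
      (fun d p => d.modify p.1 [] (fun l => l ++ [p.2])) PySem.Dict.empty =
      (PySem.List.pyRange 1 parents.length 1).foldl
        (fun d i => d.modify (PySem.List.pyGetD parents i 0) [] (fun l => l ++ [i]))
        PySem.Dict.empty := List.foldl_map
  rw [← hfm, PySem.Dict.getD_foldl_modify_append]
  simp [PySem.Dict.getD_empty, List.filter_map, List.map_map, Function.comp_def]

-- ---- characterisation of A's dfs ----

lemma pv_dfsA_nil {parents : List Int} {x : Int} (hCH : pvCH parents x = []) (f : Nat)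
    (arr : List (Int × Int)) : pvDfsA (pvBuildD parents) (f + 1) x arr = (1, arr) := by
  simp only [pvDfsA, pv_buildD_char, hCH]
  simp

lemma pv_dfsA_big {parents : List Int} {x a b c2 : Int} {t : List Int}
    (hCH : pvCH parents x = a :: b :: c2 :: t) (f : Nat) (arr : List (Int × Int)) :
    pvDfsA (pvBuildD parents) (f + 1) x arr =
      ((PySem.List.pyGetD arr x (0, 0)).1 + (PySem.List.pyGetD arr x (0, 0)).2 + 1, arr) := by
  simp only [pvDfsA, pv_buildD_char, hCH]
  simp only [List.length_cons]
  rw [if_neg (by simp), if_neg (by omega), if_neg (by omega)]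

lemma pv_dfsA_one {parents : List Int} {x c : Int} (hCH : pvCH parents x = [c]) {f : Nat}
    {arr : List (Int × Int)} {s0 : Int} {res0 : List (Int × Int)}
    (h0 : pvDfsA (pvBuildD parents) f c arr = (s0, res0)) :
    pvDfsA (pvBuildD parents) (f + 1) x arr =
      ((PySem.List.pyGetD (PySem.List.pySetD res0 x (s0, (PySem.List.pyGetD res0 x (0, 0)).2)) x (0, 0)).1 +
        (PySem.List.pyGetD (PySem.List.pySetD res0 x (s0, (PySem.List.pyGetD res0 x (0, 0)).2)) x (0, 0)).2 + 1,
       PySem.List.pySetD res0 x (s0, (PySem.List.pyGetD res0 x (0, 0)).2)) := by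
  simp only [pvDfsA, pv_buildD_char, hCH]
  rw [show PySem.List.pyGetD [c] 0 0 = c from PySem.List.pyGetD_zero_cons _ _ _, h0]
  simp

lemma pv_dfsA_two {parents : List Int} {x c0 c1 : Int} (hCH : pvCH parents x = [c0, c1]) {f : Nat}
    {arr : List (Int × Int)} {s0 s1 : Int} {res0 res1 : List (Int × Int)}
    (h0 : pvDfsA (pvBuildD parents) f c0 arr = (s0, res0))
    (h1 : pvDfsA (pvBuildD parents) f c1
        (PySem.List.pySetD res0 x (s0, (PySem.List.pyGetD res0 x (0, 0)).2)) = (s1, res1)) :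
    pvDfsA (pvBuildD parents) (f + 1) x arr =
      ((PySem.List.pyGetD (PySem.List.pySetD res1 x ((PySem.List.pyGetD res1 x (0, 0)).1, s1)) x (0, 0)).1 +
        (PySem.List.pyGetD (PySem.List.pySetD res1 x ((PySem.List.pyGetD res1 x (0, 0)).1, s1)) x (0, 0)).2 + 1,
       PySem.List.pySetD res1 x ((PySem.List.pyGetD res1 x (0, 0)).1, s1)) := by
  simp only [pvDfsA, pv_buildD_char, hCH]
  rw [show PySem.List.pyGetD [c0, c1] 0 0 = c0 from PySem.List.pyGetD_zero_cons _ _ _, h0]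
  rw [show PySem.List.pyGetD [c0, c1] 1 0 = c1 by
    rw [show (1 : Int) = ((1 : Nat) : Int) from rfl, PySem.List.pyGetD_natCast]; rfl]
  simp only [List.length_cons, List.length_nil]
  norm_num
  rw [h1]
  simp

lemma pv_dfsA_char {parents : List Int} (hn : 0 < parents.length) :
    ∀ (f : Nat) (l : List Int) (x : Int) (arr : List (Int × Int)),
      PvChain parents l x → parents.length - l.length ≤ f → arr.length = parents.length →
      (∀ j, j ∈ pvPLn parents x → PySem.List.pyGetD arr j (0, 0) = (0, 0)) →
      ∃ res, pvDfsA (pvBuildD parents) f x arr = (pvSNi parents x, res) ∧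
        res.length = parents.length ∧
        (∀ j : Int, 0 ≤ j → PySem.List.pyGetD res j (0, 0) =
          if j ∈ pvPLn parents x then pvVal parents j else PySem.List.pyGetD arr j (0, 0)) := by
  intro f
  induction f with
  | zero =>
    intro l x arr hch hf _ _
    exfalso
    have := pv_chain_length_le hn hch
    omega
  | succ f ih =>
    intro l x arr hch hf hlen Hz
    have hx := pv_chain_range hn hch
    have hxmem : x ∈ pvPLn parents x := pv_self_mem_pvPL parents parents.length x
    rcases hCH : pvCH parents x with _ | ⟨c, _ | ⟨c1, _ | ⟨c2, t⟩⟩⟩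
    · -- leaf
      have hPL : pvPLn parents x = [x] := pv_pvPLn_leaf (pv_K_nil hCH)
      have hS : pvSNi parents x = 1 := by unfold pvSNi; rw [hPL]; rfl
      refine ⟨arr, ?_, hlen, ?_⟩
      · rw [pv_dfsA_nil hCH, hS]
      · intro j hj
        rw [hPL]
        by_cases hjx : j = x
        · rw [if_pos (by simp [hjx])]
          have : pvVal parents x = (0, 0) := by unfold pvVal; rw [hCH]
          rw [hjx, this]
          exact Hz x hxmem
        · rw [if_neg (by simp [hjx])]
    · -- one child
      have hkc : c ∈ pvK parents x := by rw [pv_K_one hCH]; simp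
      have hchc : PvChain parents (l ++ [x]) c := hch.step hkc
      have hPL : pvPLn parents x = x :: pvPLn parents c := pv_pvPLn_unfold_one hn hch hCH
      obtain ⟨res0, h0, hlen0, char0⟩ := ih (l ++ [x]) c arr hchc
        (by have := pv_chain_length_le hn hchc
            simp only [List.length_append, List.length_cons, List.length_nil] at this ⊢
            omega)
        hlen
        (fun j hj => Hz j (by rw [hPL]; exact List.mem_cons_of_mem x hj))
      have hxnotc : x ∉ pvPLn parents c := pv_pvPL_not_self hn hch hkc
      have hres0x : PySem.List.pyGetD res0 x (0, 0) = (0, 0) := by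
        rw [char0 x hx.1, if_neg hxnotc]; exact Hz x hxmem
      have hxlt : x < (res0.length : Int) := by rw [hlen0]; exact hx.2
      have harr1 : PySem.List.pyGetD (PySem.List.pySetD res0 x (pvSNi parents c, 0)) x (0, 0) =
          (pvSNi parents c, 0) := by
        rw [pv_pyGetD_pySetD res0 x x _ _ hx.1 hxlt hx.1, if_pos rfl]
      have hS : pvSNi parents x = pvSNi parents c + 1 := by
        unfold pvSNi; rw [hPL]; simp only [List.length_cons]; push_cast; ring
      refine ⟨PySem.List.pySetD res0 x (pvSNi parents c, 0), ?_, ?_, ?_⟩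
      · rw [pv_dfsA_one hCH h0, hres0x]
        norm_num [harr1, hS]
      · rw [pv_length_pySetD, hlen0]
      · intro j hj
        rw [pv_pyGetD_pySetD res0 x j _ _ hx.1 hxlt hj, hPL]
        by_cases hjx : j = x
        · rw [if_pos hjx, if_pos (by simp [hjx])]
          have : pvVal parents x = (pvSNi parents c, 0) := by unfold pvVal; rw [hCH]
          rw [hjx, this]
        · rw [if_neg hjx, char0 j hj]
          by_cases hm : j ∈ pvPLn parents c
          · rw [if_pos hm, if_pos (by simp [hm])]
          · rw [if_neg hm, if_neg (by simp [hjx, hm])]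
    · -- two children
      have hkc0 : c ∈ pvK parents x := by rw [pv_K_two hCH]; simp
      have hkc1 : c1 ∈ pvK parents x := by rw [pv_K_two hCH]; simp
      have hchc0 : PvChain parents (l ++ [x]) c := hch.step hkc0
      have hchc1 : PvChain parents (l ++ [x]) c1 := hch.step hkc1
      have hPL : pvPLn parents x = x :: (pvPLn parents c ++ pvPLn parents c1) :=
        pv_pvPLn_unfold_two hn hch hCH
      have hfuel : parents.length - (l ++ [x]).length ≤ f := by
        have := pv_chain_length_le hn hchc0
        simp only [List.length_append, List.length_cons, List.length_nil] at this ⊢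
        omega
      have hdisj := pv_pvPL_disjoint hn hch hCH
      obtain ⟨res0, h0, hlen0, char0⟩ := ih (l ++ [x]) c arr hchc0 hfuel hlen
        (fun j hj => Hz j (by rw [hPL]; exact List.mem_cons_of_mem x (List.mem_append_left _ hj)))
      have hxnot0 : x ∉ pvPLn parents c := pv_pvPL_not_self hn hch hkc0
      have hxnot1 : x ∉ pvPLn parents c1 := pv_pvPL_not_self hn hch hkc1
      have hres0x : PySem.List.pyGetD res0 x (0, 0) = (0, 0) := by
        rw [char0 x hx.1, if_neg hxnot0]; exact Hz x hxmem
      have hxlt0 : x < (res0.length : Int) := by rw [hlen0]; exact hx.2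
      obtain ⟨res1, h1, hlen1, char1⟩ := ih (l ++ [x]) c1
        (PySem.List.pySetD res0 x (pvSNi parents c, (PySem.List.pyGetD res0 x (0, 0)).2))
        hchc1 hfuel
        (by rw [pv_length_pySetD, hlen0])
        (by
          intro j hj
          have hj1 := pv_pvPL_range hn hchc1 j hj
          have hjx : j ≠ x := fun h => hxnot1 (h ▸ hj)
          rw [pv_pyGetD_pySetD res0 x j _ _ hx.1 hxlt0 hj1.1, if_neg hjx, char0 j hj1.1,
            if_neg (fun hm => hdisj j ⟨hm, hj⟩)]
          exact Hz j (by rw [hPL]; exact List.mem_cons_of_mem x (List.mem_append_right _ hj)))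
      have hres1x : PySem.List.pyGetD res1 x (0, 0) = (pvSNi parents c, 0) := by
        rw [char1 x hx.1, if_neg hxnot1,
          pv_pyGetD_pySetD res0 x x _ _ hx.1 hxlt0 hx.1, if_pos rfl, hres0x]
      have hxlt1 : x < (res1.length : Int) := by rw [hlen1]; exact hx.2
      have harr2 : PySem.List.pyGetD
          (PySem.List.pySetD res1 x (pvSNi parents c, pvSNi parents c1)) x (0, 0) =
          (pvSNi parents c, pvSNi parents c1) := by
        rw [pv_pyGetD_pySetD res1 x x _ _ hx.1 hxlt1 hx.1, if_pos rfl]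
      have hS : pvSNi parents x = pvSNi parents c + pvSNi parents c1 + 1 := by
        unfold pvSNi; rw [hPL]
        simp only [List.length_cons, List.length_append]
        push_cast; ring
      refine ⟨PySem.List.pySetD res1 x (pvSNi parents c, pvSNi parents c1), ?_, ?_, ?_⟩
      · rw [pv_dfsA_two hCH h0 h1]
        norm_num [hres1x, harr2, hS]
      · rw [pv_length_pySetD, hlen1]
      · intro j hj
        rw [pv_pyGetD_pySetD res1 x j _ _ hx.1 hxlt1 hj, hPL]
        by_cases hjx : j = x
        · rw [if_pos hjx, if_pos (by simp [hjx])]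
          have : pvVal parents x = (pvSNi parents c, pvSNi parents c1) := by
            unfold pvVal; rw [hCH]
          rw [hjx, this]
        · rw [if_neg hjx, char1 j hj]
          by_cases hm1 : j ∈ pvPLn parents c1
          · rw [if_pos hm1, if_pos (by simp [hm1])]
          · rw [if_neg hm1,
              pv_pyGetD_pySetD res0 x j _ _ hx.1 hxlt0 hj, if_neg hjx, char0 j hj]
            by_cases hm0 : j ∈ pvPLn parents c
            · rw [if_pos hm0, if_pos (by simp [hm0])]
            · rw [if_neg hm0, if_neg (by simp [hjx, hm0, hm1])]
    · -- three or more children: treated as a leaf by A (excluded by Pre_, but harmless here)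
      have hPL : pvPLn parents x = [x] := pv_pvPLn_leaf (pv_K_big hCH)
      have hS : pvSNi parents x = 1 := by unfold pvSNi; rw [hPL]; rfl
      have harrx := Hz x hxmem
      refine ⟨arr, ?_, hlen, ?_⟩
      · rw [pv_dfsA_big hCH, harrx, hS]
        simp
      · intro j hj
        rw [hPL]
        by_cases hjx : j = x
        · rw [if_pos (by simp [hjx])]
          have : pvVal parents x = (0, 0) := by unfold pvVal; rw [hCH]
          rw [hjx, this]
          exact Hz x hxmem
        · rw [if_neg (by simp [hjx])]


-- ---- characterisation of B's stack loop ----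

lemma pv_runB_push (ch : PySem.Dict Int (List Int)) (f : Nat) (x : Int) (rest : List (Int × Bool))
    (size : List Int) :
    pvRunB ch (f + 1) ((x, false) :: rest) size =
      pvRunB ch f ((ch.getD x []).reverse.map (fun c => (c, false)) ++ (x, true) :: rest) size := by
  simp [pvRunB]

lemma pv_runB_pop (ch : PySem.Dict Int (List Int)) (f : Nat) (x : Int) (rest : List (Int × Bool))
    (size : List Int) :
    pvRunB ch (f + 1) ((x, true) :: rest) size =
      pvRunB ch f rest ((ch.getD x []).foldl
        (fun sz c => PySem.List.pySetD sz x
          (PySem.List.pyGetD sz x 0 + PySem.List.pyGetD sz c 0)) size) := by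
  simp [pvRunB]

lemma pv_runB_leaf {parents : List Int} (hn : 0 < parents.length)
    (hk2 : ∀ v, pvK parents v = pvCH parents v) {l : List Int} {x : Int}
    (hch : PvChain parents l x) (hk : pvK parents x = []) :
    ∀ (f : Nat) (rest : List (Int × Bool)) (size : List Int), size.length = parents.length →
      (∀ j, j ∈ pvPLn parents x → PySem.List.pyGetD size j 0 = 1) →
      ∃ out, pvRunB (pvChildrenB parents) (f + 2 * (pvPLn parents x).length) ((x, false) :: rest) size =
          pvRunB (pvChildrenB parents) f rest out ∧
        out.length = parents.length ∧
        (∀ j : Int, 0 ≤ j → PySem.List.pyGetD out j 0 =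
          if j ∈ pvPLn parents x then pvSNi parents j else PySem.List.pyGetD size j 0) := by
  intro f rest size hlen Hone
  have hkb : (pvChildrenB parents).getD x [] = pvK parents x := by
    rw [pv_childrenB_char, ← hk2]
  have hPL : pvPLn parents x = [x] := pv_pvPLn_leaf hk
  refine ⟨size, ?_, hlen, ?_⟩
  · have h2 : f + 2 * (pvPLn parents x).length = (f + 1) + 1 := by rw [hPL]; simp
    rw [h2, pv_runB_push, hkb, hk]
    simp only [List.reverse_nil, List.map_nil, List.nil_append]
    rw [pv_runB_pop, hkb, hk]
    simp only [List.foldl_nil]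
  · intro j hj
    rw [hPL]
    by_cases hjx : j = x
    · rw [if_pos (by simp [hjx]), hjx]
      have hS : pvSNi parents x = 1 := by unfold pvSNi; rw [hPL]; rfl
      rw [hS]
      exact Hone x (by rw [hPL]; simp)
    · rw [if_neg (by simp [hjx])]

lemma pv_runB_char {parents : List Int} (hn : 0 < parents.length)
    (hk2 : ∀ v, pvK parents v = pvCH parents v) :
    ∀ (b : Nat) (l : List Int) (x : Int), PvChain parents l x →
      parents.length - 1 - l.length ≤ b →
      ∀ (f : Nat) (rest : List (Int × Bool)) (size : List Int), size.length = parents.length →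
      (∀ j, j ∈ pvPLn parents x → PySem.List.pyGetD size j 0 = 1) →
      ∃ out, pvRunB (pvChildrenB parents) (f + 2 * (pvPLn parents x).length) ((x, false) :: rest) size =
          pvRunB (pvChildrenB parents) f rest out ∧
        out.length = parents.length ∧
        (∀ j : Int, 0 ≤ j → PySem.List.pyGetD out j 0 =
          if j ∈ pvPLn parents x then pvSNi parents j else PySem.List.pyGetD size j 0) := by
  intro b
  induction b with
  | zero =>
    intro l x hch hb f rest size hlen Hone
    by_cases hk : pvK parents x = []
    · exact pv_runB_leaf hn hk2 hch hk f rest size hlen Hone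
    · exfalso; have := pv_chain_kids_length hn hch hk; omega
  | succ b ih =>
    intro l x hch hb f rest size hlen Hone
    by_cases hk : pvK parents x = []
    · exact pv_runB_leaf hn hk2 hch hk f rest size hlen Hone
    have hx := pv_chain_range hn hch
    have hxmem : x ∈ pvPLn parents x := pv_self_mem_pvPL parents parents.length x
    have hkb : (pvChildrenB parents).getD x [] = pvK parents x := by
      rw [pv_childrenB_char, ← hk2]
    have hlenk := pv_chain_kids_length hn hch hk
    have hblen : parents.length - 1 - (l ++ [x]).length ≤ b := by
      simp only [List.length_append, List.length_cons, List.length_nil]; omega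
    rcases hCH : pvCH parents x with _ | ⟨c, _ | ⟨c1, _ | ⟨c2, t⟩⟩⟩
    · exact absurd (pv_K_nil hCH) hk
    · -- one child
      have hK : pvK parents x = [c] := pv_K_one hCH
      have hkc : c ∈ pvK parents x := by rw [hK]; simp
      have hchc : PvChain parents (l ++ [x]) c := hch.step hkc
      have hPL : pvPLn parents x = x :: pvPLn parents c := pv_pvPLn_unfold_one hn hch hCH
      have hxnotc : x ∉ pvPLn parents c := pv_pvPL_not_self hn hch hkc
      obtain ⟨out0, e0, hlen0, char0⟩ := ih (l ++ [x]) c hchc hblen (f + 1) ((x, true) :: rest)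
        size hlen (fun j hj => Hone j (by rw [hPL]; exact List.mem_cons_of_mem x hj))
      have hcr := pv_mem_K hkc
      have hout0x : PySem.List.pyGetD out0 x 0 = 1 := by
        rw [char0 x hx.1, if_neg hxnotc]; exact Hone x hxmem
      have hout0c : PySem.List.pyGetD out0 c 0 = pvSNi parents c := by
        rw [char0 c (by omega),
          if_pos (show c ∈ pvPLn parents c from pv_self_mem_pvPL parents parents.length c)]
      have hxlt0 : x < (out0.length : Int) := by rw [hlen0]; exact hx.2
      have hS : pvSNi parents x = pvSNi parents c + 1 := by
        unfold pvSNi; rw [hPL]; simp only [List.length_cons]; push_cast; ring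
      refine ⟨PySem.List.pySetD out0 x (1 + pvSNi parents c), ?_, ?_, ?_⟩
      · have hfe : f + 2 * (pvPLn parents x).length =
            ((f + 1) + 2 * (pvPLn parents c).length) + 1 := by
          rw [hPL]; simp only [List.length_cons]; omega
        rw [hfe, pv_runB_push, hkb, hK]
        simp only [List.reverse_cons, List.reverse_nil, List.nil_append, List.map_cons,
          List.map_nil, List.cons_append, List.nil_append]
        rw [e0, pv_runB_pop, hkb, hK]
        simp only [List.foldl_cons, List.foldl_nil]
        rw [hout0x, hout0c]
      · rw [pv_length_pySetD, hlen0]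
      · intro j hj
        rw [pv_pyGetD_pySetD out0 x j _ _ hx.1 hxlt0 hj, hPL]
        by_cases hjx : j = x
        · rw [if_pos hjx, if_pos (by simp [hjx]), hjx, hS]; ring
        · rw [if_neg hjx, char0 j hj]
          by_cases hm : j ∈ pvPLn parents c
          · rw [if_pos hm, if_pos (by simp [hm])]
          · rw [if_neg hm, if_neg (by simp [hjx, hm])]
    · -- two children
      have hK : pvK parents x = [c, c1] := pv_K_two hCH
      have hkc0 : c ∈ pvK parents x := by rw [hK]; simp
      have hkc1 : c1 ∈ pvK parents x := by rw [hK]; simp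
      have hchc0 : PvChain parents (l ++ [x]) c := hch.step hkc0
      have hchc1 : PvChain parents (l ++ [x]) c1 := hch.step hkc1
      have hPL : pvPLn parents x = x :: (pvPLn parents c ++ pvPLn parents c1) :=
        pv_pvPLn_unfold_two hn hch hCH
      have hxnot0 : x ∉ pvPLn parents c := pv_pvPL_not_self hn hch hkc0
      have hxnot1 : x ∉ pvPLn parents c1 := pv_pvPL_not_self hn hch hkc1
      have hdisj := pv_pvPL_disjoint hn hch hCH
      have hc0r := pv_mem_K hkc0
      have hc1r := pv_mem_K hkc1
      obtain ⟨out1, e1, hlen1, char1⟩ := ih (l ++ [x]) c1 hchc1 hblen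
        (f + 1 + 2 * (pvPLn parents c).length) ((c, false) :: (x, true) :: rest) size hlen
        (fun j hj => Hone j
          (by rw [hPL]; exact List.mem_cons_of_mem x (List.mem_append_right _ hj)))
      obtain ⟨out0, e00, hlen0, char0⟩ := ih (l ++ [x]) c hchc0 hblen
        (f + 1) ((x, true) :: rest) out1 hlen1
        (by
          intro j hj
          have hjr := pv_pvPL_range hn hchc0 j hj
          rw [char1 j hjr.1, if_neg (fun hm => hdisj j ⟨hj, hm⟩)]
          exact Hone j
            (by rw [hPL]; exact List.mem_cons_of_mem x (List.mem_append_left _ hj)))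
      have hc1nx : c1 ≠ x := fun h =>
        hxnot1 (h ▸ pv_self_mem_pvPL parents parents.length c1)
      have hout0x : PySem.List.pyGetD out0 x 0 = 1 := by
        rw [char0 x hx.1, if_neg hxnot0, char1 x hx.1, if_neg hxnot1]
        exact Hone x hxmem
      have hout0c0 : PySem.List.pyGetD out0 c 0 = pvSNi parents c := by
        rw [char0 c (by omega),
          if_pos (show c ∈ pvPLn parents c from pv_self_mem_pvPL parents parents.length c)]
      have hout0c1 : PySem.List.pyGetD out0 c1 0 = pvSNi parents c1 := by
        rw [char0 c1 (by omega),
          if_neg (fun hm => hdisj c1 ⟨hm, pv_self_mem_pvPL parents parents.length c1⟩),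
          char1 c1 (by omega),
          if_pos (show c1 ∈ pvPLn parents c1 from pv_self_mem_pvPL parents parents.length c1)]
      have hxlt0 : x < (out0.length : Int) := by rw [hlen0]; exact hx.2
      have hsz1x : PySem.List.pyGetD (PySem.List.pySetD out0 x (1 + pvSNi parents c)) x 0 =
          1 + pvSNi parents c := by
        rw [pv_pyGetD_pySetD out0 x x _ _ hx.1 hxlt0 hx.1, if_pos rfl]
      have hsz1c1 : PySem.List.pyGetD (PySem.List.pySetD out0 x (1 + pvSNi parents c)) c1 0 =
          pvSNi parents c1 := by
        rw [pv_pyGetD_pySetD out0 x c1 _ _ hx.1 hxlt0 (by omega), if_neg hc1nx, hout0c1]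
      have hS : pvSNi parents x = pvSNi parents c + pvSNi parents c1 + 1 := by
        unfold pvSNi; rw [hPL]
        simp only [List.length_cons, List.length_append]
        push_cast; ring
      refine ⟨PySem.List.pySetD (PySem.List.pySetD out0 x (1 + pvSNi parents c)) x
        (1 + pvSNi parents c + pvSNi parents c1), ?_, ?_, ?_⟩
      · have hfe : f + 2 * (pvPLn parents x).length =
            (((f + 1) + 2 * (pvPLn parents c).length) + 2 * (pvPLn parents c1).length) + 1 := by
          rw [hPL]; simp only [List.length_cons, List.length_append]; omega
        rw [hfe, pv_runB_push, hkb, hK]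
        simp only [List.reverse_cons, List.reverse_nil, List.nil_append, List.map_cons,
          List.map_nil, List.cons_append, List.nil_append, List.map_append]
        rw [e1, e00, pv_runB_pop, hkb, hK]
        simp only [List.foldl_cons, List.foldl_nil]
        rw [hout0x, hout0c0, hsz1x, hsz1c1]
      · rw [pv_length_pySetD, pv_length_pySetD, hlen0]
      · intro j hj
        have hxlt1 : x < ((PySem.List.pySetD out0 x (1 + pvSNi parents c)).length : Int) := by
          rw [pv_length_pySetD, hlen0]; exact hx.2
        rw [pv_pyGetD_pySetD _ x j _ _ hx.1 hxlt1 hj, hPL]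
        by_cases hjx : j = x
        · rw [if_pos hjx, if_pos (by simp [hjx]), hjx, hS]; ring
        · rw [if_neg hjx, pv_pyGetD_pySetD out0 x j _ _ hx.1 hxlt0 hj, if_neg hjx,
            char0 j hj]
          by_cases hm0 : j ∈ pvPLn parents c
          · rw [if_pos hm0, if_pos (by simp [hm0])]
          · rw [if_neg hm0, char1 j hj]
            by_cases hm1 : j ∈ pvPLn parents c1
            · rw [if_pos hm1, if_pos (by simp [hm1])]
            · rw [if_neg hm1, if_neg (by simp [hjx, hm0, hm1])]
    · exact absurd (pv_K_big hCH) hk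

-- ---- max/count loop ----

lemma pv_bestcnt (t : List Int) : ∀ (b c : Int),
    t.foldl (fun bc s => if s > bc.1 then (s, 1) else if s = bc.1 then (bc.1, bc.2 + 1) else bc) (b, c) =
      (t.foldl max b, if t.foldl max b = b then c + (t.count b : Int) else (t.count (t.foldl max b) : Int)) := by
  induction t with
  | nil => intro b c; simp
  | cons s t ih =>
    intro b c
    simp only [List.foldl_cons]
    by_cases h1 : s > b
    · rw [if_pos h1, ih, max_eq_right h1.le]
      have hle := (PySem.List.le_foldl_max t s).1
      by_cases hM : t.foldl max s = s
      · rw [if_pos hM, if_neg (by omega), hM]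
        simp [Prod.ext_iff, List.count_cons]
        omega
      · rw [if_neg hM, if_neg (by omega)]
        have hbs : (t.foldl max s == s) = false := by simp [hM]
        simp [Prod.ext_iff, List.count_cons, hbs]
        omega
    · rw [if_neg h1]
      by_cases h2 : s = b
      · rw [if_pos h2, ih, h2, max_self]
        by_cases hM : t.foldl max b = b
        · rw [if_pos hM, if_pos hM]
          have hbs : (t.foldl max b == b) = true := by simp [hM]
          simp [Prod.ext_iff, List.count_cons, hbs]
          omega
        · rw [if_neg hM, if_neg hM]
          have hbs : (t.foldl max b == b) = false := by simp [hM]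
          simp [Prod.ext_iff, List.count_cons, hbs]
          omega
      · rw [if_neg h2, ih]
        have hsb : s < b := by omega
        rw [max_eq_left hsb.le]
        have hge := (PySem.List.le_foldl_max t b).1
        by_cases hM : t.foldl max b = b
        · rw [if_pos hM, if_pos hM]
          have hbs : (b == s) = false := by simp; omega
          rw [hM]
          simp [Prod.ext_iff, List.count_cons, hbs]
          omega
        · rw [if_neg hM, if_neg hM]
          have hbs : (t.foldl max b == s) = false := by simp; omega
          simp [Prod.ext_iff, List.count_cons, hbs]
          omega

-- ===== VERDICT (by name: the statement is the Claim_ definition above) =====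
theorem countHighestScoreNodes_spec : Claim_equal_countHighestScoreNodes := by
  intro parents _hdom hpre
  obtain ⟨hne, hcnt⟩ := hpre
  unfold Spec_countHighestScoreNodes
  have hn : 0 < parents.length := by
    cases parents with
    | nil => exact absurd rfl hne
    | cons a t => simp
  have hk2 : ∀ v, pvK parents v = pvCH parents v := pv_pre_K hcnt
  -- characterise A's dfs run
  have hzr : ∀ j, j ∈ pvPLn parents 0 →
      PySem.List.pyGetD (List.replicate parents.length ((0:Int), (0:Int))) j (0, 0) = (0, 0) := by
    intro j hj
    have hr := pv_pvPL_range hn PvChain.base j hj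
    rw [pv_pyGetD_replicate _ _ _ j hr.1, if_pos hr.2]
  obtain ⟨res, hdfs, hreslen, hchar⟩ := pv_dfsA_char hn (parents.length + 1) [] 0
    (List.replicate parents.length (0, 0)) PvChain.base (by simp) (by simp) hzr
  -- characterise B's stack run
  have hone : ∀ j, j ∈ pvPLn parents 0 →
      PySem.List.pyGetD (List.replicate parents.length (1:Int)) j 0 = 1 := by
    intro j hj
    have hr := pv_pvPL_range hn PvChain.base j hj
    rw [pv_pyGetD_replicate _ _ _ j hr.1, if_pos hr.2]
  obtain ⟨out, hrun, houtlen, hochar⟩ := pv_runB_char hn hk2 (parents.length - 1) [] 0 PvChain.base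
    (by simp) (2 * parents.length + 1 - 2 * (pvPLn parents 0).length) []
    (List.replicate parents.length 1) (by simp) hone
  have hSle : (pvPLn parents 0).length ≤ parents.length := pv_SN_le hn PvChain.base
  have hSpos := pv_PL_length_pos parents parents.length 0
  have hfuel : 2 * parents.length + 1 - 2 * (pvPLn parents 0).length +
      2 * (pvPLn parents 0).length = 2 * parents.length + 1 := by omega
  have hsz : pvRunB (pvChildrenB parents) (2 * parents.length + 1) [((0:Int), false)]
      (List.replicate parents.length 1) = out := by
    rw [← hfuel, hrun]
    simp [pvRunB]
  have hzero_mem : (0:Int) ∈ pvPLn parents 0 := pv_self_mem_pvPL parents parents.length 0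
  have houtT : PySem.List.pyGetD out 0 0 = pvSNi parents 0 := by
    rw [hochar 0 le_rfl, if_pos hzero_mem]
  -- pointwise score equality
  have hscore : ∀ j : Int, 0 ≤ j → j < (parents.length : Int) →
      max (PySem.List.pyGetD res j (0, 0)).1 1 * max (PySem.List.pyGetD res j (0, 0)).2 1 *
        max (pvSNi parents 0 - (PySem.List.pyGetD res j (0, 0)).1 -
          (PySem.List.pyGetD res j (0, 0)).2 - 1) 1 =
      ((pvChildrenB parents).getD j []).foldl (fun s c => s * PySem.List.pyGetD out c 0)
        (max (pvSNi parents 0 - PySem.List.pyGetD out j 0) 1) := by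
    intro j h0 h1
    rw [pv_childrenB_char, ← hk2 j]
    by_cases hr : j ∈ pvPLn parents 0
    · obtain ⟨m, hmj, _, _⟩ := pv_pvPL_mem_chain _ _ _ PvChain.base hr
      rw [List.nil_append] at hmj
      have hoj : PySem.List.pyGetD out j 0 = pvSNi parents j := by
        rw [hochar j h0, if_pos hr]
      have hrj : PySem.List.pyGetD res j (0, 0) = pvVal parents j := by
        rw [hchar j h0, if_pos hr]
      rw [hoj, hrj]
      rcases hCH : pvCH parents j with _ | ⟨c, _ | ⟨c1, _ | ⟨c2, t⟩⟩⟩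
      · have hVal : pvVal parents j = (0, 0) := by unfold pvVal; rw [hCH]
        have hS1 : pvSNi parents j = 1 := by
          unfold pvSNi; rw [pv_pvPLn_leaf (pv_K_nil hCH)]; rfl
        rw [hVal, pv_K_nil hCH, hS1]
        simp only [List.foldl_nil]
        norm_num
      · have hK := pv_K_one hCH
        have hkc : c ∈ pvK parents j := by rw [hK]; simp
        have hVal : pvVal parents j = (pvSNi parents c, 0) := by unfold pvVal; rw [hCH]
        have hS : pvSNi parents j = pvSNi parents c + 1 := by
          unfold pvSNi; rw [pv_pvPLn_unfold_one hn hmj hCH]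
          simp only [List.length_cons]; push_cast; ring
        have hcm : c ∈ pvPLn parents 0 := pv_pvPL_kid_mem hn hr hkc
        have hcr := pv_mem_K hkc
        have hoc : PySem.List.pyGetD out c 0 = pvSNi parents c := by
          rw [hochar c (by omega), if_pos hcm]
        rw [hVal, hK, hS]
        simp only [List.foldl_cons, List.foldl_nil, hoc]
        rw [show max ((0:Int)) 1 = 1 from by norm_num,
          max_eq_left (pv_SN_pos parents c),
          show pvSNi parents 0 - (pvSNi parents c + 1) =
            pvSNi parents 0 - pvSNi parents c - 0 - 1 from by ring]
        ring
      · have hK := pv_K_two hCH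
        have hkc0 : c ∈ pvK parents j := by rw [hK]; simp
        have hkc1 : c1 ∈ pvK parents j := by rw [hK]; simp
        have hVal : pvVal parents j = (pvSNi parents c, pvSNi parents c1) := by
          unfold pvVal; rw [hCH]
        have hS : pvSNi parents j = pvSNi parents c + pvSNi parents c1 + 1 := by
          unfold pvSNi; rw [pv_pvPLn_unfold_two hn hmj hCH]
          simp only [List.length_cons, List.length_append]; push_cast; ring
        have hcr0 := pv_mem_K hkc0
        have hcr1 := pv_mem_K hkc1
        have hoc0 : PySem.List.pyGetD out c 0 = pvSNi parents c := by
          rw [hochar c (by omega), if_pos (pv_pvPL_kid_mem hn hr hkc0)]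
        have hoc1 : PySem.List.pyGetD out c1 0 = pvSNi parents c1 := by
          rw [hochar c1 (by omega), if_pos (pv_pvPL_kid_mem hn hr hkc1)]
        rw [hVal, hK, hS]
        simp only [List.foldl_cons, List.foldl_nil, hoc0, hoc1]
        rw [max_eq_left (pv_SN_pos parents c), max_eq_left (pv_SN_pos parents c1),
          show pvSNi parents 0 - (pvSNi parents c + pvSNi parents c1 + 1) =
            pvSNi parents 0 - pvSNi parents c - pvSNi parents c1 - 1 from by ring]
        ring
      · exfalso
        have := hk2 j
        rw [pv_K_big hCH, hCH] at this
        simp at this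
    · have hoj : PySem.List.pyGetD out j 0 = 1 := by
        rw [hochar j h0, if_neg hr, pv_pyGetD_replicate _ _ _ j h0, if_pos h1]
      have hrj : PySem.List.pyGetD res j (0, 0) = (0, 0) := by
        rw [hchar j h0, if_neg hr, pv_pyGetD_replicate _ _ _ j h0, if_pos h1]
      have hkid1 : ∀ c, c ∈ pvK parents j → PySem.List.pyGetD out c 0 = 1 := by
        intro c hc
        have hcnr : c ∉ pvPLn parents 0 := fun hcm => hr (pv_reach_parent hn hc hcm)
        have hcr := pv_mem_K hc
        rw [hochar c (by omega), if_neg hcnr,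
          pv_pyGetD_replicate _ _ _ c (by omega), if_pos (by omega)]
      rw [hrj, hoj]
      rcases hCH : pvCH parents j with _ | ⟨c, _ | ⟨c1, _ | ⟨c2, t⟩⟩⟩
      · rw [pv_K_nil hCH]; simp only [List.foldl_nil]; norm_num
      · have hK := pv_K_one hCH
        rw [hK]
        simp only [List.foldl_cons, List.foldl_nil, hkid1 c (by rw [hK]; simp)]
        norm_num
      · have hK := pv_K_two hCH
        rw [hK]
        simp only [List.foldl_cons, List.foldl_nil, hkid1 c (by rw [hK]; simp),
          hkid1 c1 (by rw [hK]; simp)]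
        norm_num
      · exfalso
        have := hk2 j
        rw [pv_K_big hCH, hCH] at this
        simp at this
  -- unfold both ports
  simp only [countHighestScoreNodes, countHighestScoreNodes_alt]
  rw [hdfs, hsz]
  dsimp only
  rw [houtT, PySem.List.foldl_append_singleton_eq_map]
  simp only [List.nil_append]
  -- turn B's loop into a fold over the mapped score list
  have hmap : ((PySem.List.pyRange 0 (parents.length : Int) 1).map
        (fun v => ((pvChildrenB parents).getD v []).foldl
          (fun s c => s * PySem.List.pyGetD out c 0)
          (max (pvSNi parents 0 - PySem.List.pyGetD out v 0) 1))).foldl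
      (fun bc s => if s > bc.1 then (s, 1) else if s = bc.1 then (bc.1, bc.2 + 1) else bc)
      ((0:Int), (0:Int)) =
      (PySem.List.pyRange 0 (parents.length : Int) 1).foldl
        (fun bc v =>
          if ((pvChildrenB parents).getD v []).foldl
              (fun s c => s * PySem.List.pyGetD out c 0)
              (max (pvSNi parents 0 - PySem.List.pyGetD out v 0) 1) > bc.1 then
            (((pvChildrenB parents).getD v []).foldl
              (fun s c => s * PySem.List.pyGetD out c 0)
              (max (pvSNi parents 0 - PySem.List.pyGetD out v 0) 1), 1)
          else if ((pvChildrenB parents).getD v []).foldl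
              (fun s c => s * PySem.List.pyGetD out c 0)
              (max (pvSNi parents 0 - PySem.List.pyGetD out v 0) 1) = bc.1 then
            (bc.1, bc.2 + 1)
          else bc)
        ((0:Int), (0:Int)) := List.foldl_map
  rw [← hmap]
  -- the two score lists coincide
  have hlist : res.map (fun ij => max ij.1 1 * max ij.2 1 *
        max (pvSNi parents 0 - ij.1 - ij.2 - 1) 1) =
      (PySem.List.pyRange 0 (parents.length : Int) 1).map
        (fun v => ((pvChildrenB parents).getD v []).foldl
          (fun s c => s * PySem.List.pyGetD out c 0)
          (max (pvSNi parents 0 - PySem.List.pyGetD out v 0) 1)) := by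
    apply List.ext_getElem
    · simp [PySem.List.length_pyRange_one, hreslen]
    · intro k hk1 hk2'
      simp only [List.getElem_map]
      rw [PySem.List.getElem_pyRange_one]
      have hkn : k < parents.length := by simpa [hreslen] using hk1
      have hres_get : res[k] = PySem.List.pyGetD res (k : Int) (0, 0) := by
        rw [PySem.List.pyGetD_natCast, List.getD_eq_getElem res (0, 0) (by omega)]
      rw [hres_get, show ((0:Int) + (k:Int)) = (k:Int) from by ring]
      exact hscore (k : Int) (by positivity) (by exact_mod_cast hkn)
  rw [← hlist]
  -- both sides count the maximum of the same nonempty list of scores ≥ 1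
  obtain ⟨a, t, hat⟩ : ∃ a t, res.map (fun ij => max ij.1 1 * max ij.2 1 *
      max (pvSNi parents 0 - ij.1 - ij.2 - 1) 1) = a :: t := by
    cases h : res.map (fun ij => max ij.1 1 * max ij.2 1 *
        max (pvSNi parents 0 - ij.1 - ij.2 - 1) 1) with
    | nil =>
      exfalso
      have := congrArg List.length h
      rw [List.length_map, hreslen] at this
      simp only [List.length_nil] at this
      omega
    | cons a t => exact ⟨a, t, rfl⟩
  rw [hat]
  have hone' : ∀ s ∈ a :: t, (1:Int) ≤ s := by
    rw [← hat]
    intro s hs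
    obtain ⟨ij, _, rfl⟩ := List.mem_map.mp hs
    have h1 := le_max_right ij.1 (1:Int)
    have h2 := le_max_right ij.2 (1:Int)
    have h3 := le_max_right (pvSNi parents 0 - ij.1 - ij.2 - 1) (1:Int)
    have h12 : (1:Int) ≤ max ij.1 1 * max ij.2 1 := by
      nlinarith [mul_nonneg (sub_nonneg.mpr h1) (sub_nonneg.mpr h2)]
    nlinarith [mul_nonneg (sub_nonneg.mpr h12) (sub_nonneg.mpr h3)]
  rw [PySem.List.max?_id_cons]
  have ha1 : (1:Int) ≤ a := hone' a (by simp)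
  have hM : (a :: t).foldl max 0 = t.foldl max a := by
    simp only [List.foldl_cons]
    rw [max_eq_right (by omega)]
  have hMge : a ≤ t.foldl max a := (PySem.List.le_foldl_max t a).1
  rw [pv_bestcnt (a :: t) 0 0]
  dsimp only
  rw [hM, if_neg (by omega), PySem.List.count_eq]
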